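-- pv_equiv track=rewrite | github.com/marcschulder/BibTexNanny | bibtexnanny/fixer.py | fixUnsecuredUppercase
-- ===== SOURCE A (Python) =====
-- def fixUnsecuredUppercase(text, unsecuredChars):
--     unsecuredChars = set(unsecuredChars)
--     fixed_chars = []
--     lastCharWasClosingCurlyBrace = False
--     for i, c in enumerate(text):
--         if i in unsecuredChars:
--             if lastCharWasClosingCurlyBrace:
--                 fixed_chars.pop(-1)
--             else:
--                 fixed_chars.append('{')
--             fixed_chars.append(c)
--             fixed_chars.append('}')
--             lastCharWasClosingCurlyBrace = True
--         else:
--             fixed_chars.append(c)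
--             lastCharWasClosingCurlyBrace = c == '}'
--     fixed_title = ''.join(fixed_chars)
--     return fixed_title
-- ===== SOURCE B (Python) =====
-- def fixUnsecuredUppercase(text, unsecuredChars):
--     unsecured = set(unsecuredChars)
--     out = []
--     i = 0
--     n = len(text)
--     while i < n:
--         if i in unsecured:
--             # find the maximal run of consecutive unsecured indices [i, j)
--             j = i + 1
--             while j < n and j in unsecured:
--                 j += 1
--             # merge with a preceding closing brace (a literal '}' or a prior run)
--             if out and out[-1] == '}':
--                 out.pop()
--             else:
--                 out.append('{')
--             out.extend(text[i:j])
--             out.append('}')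
--             i = j
--         else:
--             out.append(text[i])
--             i += 1
--     return ''.join(out)
-- ===== Notes on version B (the rewrite author's own statement) =====
-- stated objective: alternative
-- what changed: A scans character by character carrying a 'last char was }' flag and patches braces one char at a time; B scans by maximal runs of consecutive unsecured indices, emitting each run wrapped as one '{run}' block and popping a preceding '}' to merge.
import Mathlib
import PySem

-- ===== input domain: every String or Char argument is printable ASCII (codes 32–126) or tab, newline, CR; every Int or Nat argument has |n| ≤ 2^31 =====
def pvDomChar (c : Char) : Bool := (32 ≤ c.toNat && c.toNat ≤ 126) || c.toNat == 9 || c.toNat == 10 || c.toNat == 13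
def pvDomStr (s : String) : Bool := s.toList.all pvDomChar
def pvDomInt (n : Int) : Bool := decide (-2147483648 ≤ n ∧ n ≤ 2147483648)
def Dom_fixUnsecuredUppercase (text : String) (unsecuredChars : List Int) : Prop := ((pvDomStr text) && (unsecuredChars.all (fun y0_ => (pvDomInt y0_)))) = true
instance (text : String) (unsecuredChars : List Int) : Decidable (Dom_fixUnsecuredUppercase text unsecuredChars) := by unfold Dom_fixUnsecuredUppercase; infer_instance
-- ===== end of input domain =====

-- B rewrites A's per-character loop with a brace flag as a run-based scan (emit maximal
-- unsecured runs wrapped at once, merging a preceding '}'): objective 'alternative'.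

-- ===== PORT A =====
-- A's for-loop over enumerate(text) with state (fixed_chars, lastCharWasClosingCurlyBrace)
def pvFixAGo (S : PySem.Set Int) (chars : List Char) (i : Int) (acc : List Char) (flag : Bool) : List Char :=
  match chars with
  | [] => acc
  | c :: rest =>
    if PySem.Set.contains S i then
      pvFixAGo S rest (i+1) (((if flag then acc.dropLast else acc ++ ['{']) ++ [c]) ++ ['}']) true
    else
      pvFixAGo S rest (i+1) (acc ++ [c]) (c == '}')

def fixUnsecuredUppercase (text : String) (unsecuredChars : List Int) : String :=
  String.mk (pvFixAGo (PySem.Set.ofList unsecuredChars) text.toList 0 [] false)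

-- ===== PORT B =====
-- inner while loop of B: consume the run of consecutive unsecured indices starting at j;
-- returns (run chars, remaining chars, next index)
def pvGrabRun (S : PySem.Set Int) (chars : List Char) (j : Int) : List Char × List Char × Int :=
  match chars with
  | [] => ([], [], j)
  | d :: ds =>
    if PySem.Set.contains S j then
      let r := pvGrabRun S ds (j+1)
      (d :: r.1, r.2.1, r.2.2)
    else ([], d :: ds, j)

-- termination measure for the outer loop (cited by pvFixBGo's decreasing_by)
theorem pvGrabRun_rest_le (S : PySem.Set Int) : ∀ (chars : List Char) (j : Int),
    (pvGrabRun S chars j).2.1.length ≤ chars.length := by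
  intro chars
  induction chars with
  | nil => intro j; simp [pvGrabRun]
  | cons d ds ih =>
    intro j
    simp only [pvGrabRun]
    split
    · exact Nat.le_succ_of_le (ih (j+1))
    · simp

-- B's outer while loop over the text index
def pvFixBGo (S : PySem.Set Int) (chars : List Char) (i : Int) (acc : List Char) : List Char :=
  match chars with
  | [] => acc
  | c :: rest =>
    if PySem.Set.contains S i then
      let r := pvGrabRun S rest (i+1)
      let pre := if acc.getLast? = some '}' then acc.dropLast else acc ++ ['{']
      pvFixBGo S r.2.1 r.2.2 ((pre ++ (c :: r.1)) ++ ['}'])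
    else
      pvFixBGo S rest (i+1) (acc ++ [c])
termination_by chars.length
decreasing_by
  · exact Nat.lt_succ_of_le (pvGrabRun_rest_le S rest (i+1))
  · simp

def fixUnsecuredUppercase_alt (text : String) (unsecuredChars : List Int) : String :=
  String.mk (pvFixBGo (PySem.Set.ofList unsecuredChars) text.toList 0 [])

-- ===== PRECONDITION & SPEC =====
def Spec_fixUnsecuredUppercase (text : String) (unsecuredChars : List Int) (out : String) : Prop := out = fixUnsecuredUppercase_alt text unsecuredChars
instance (text : String) (unsecuredChars : List Int) (out : String) : Decidable (Spec_fixUnsecuredUppercase text unsecuredChars out) := by unfold Spec_fixUnsecuredUppercase; infer_instance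

-- ===== CLAIM (what is proved, stated in full; the proofs are below) =====
def Claim_equal_fixUnsecuredUppercase : Prop := ∀ (text : String) (unsecuredChars : List Int), Dom_fixUnsecuredUppercase text unsecuredChars → Spec_fixUnsecuredUppercase text unsecuredChars (fixUnsecuredUppercase text unsecuredChars)

-- ===== LEMMAS AND PROOFS =====

theorem pvLastBrace (X : List Char) : (X ++ ['}']).getLast? = some '}' := by simp

-- pvGrabRun splits its input into a run (all of whose indices are unsecured) and the rest
theorem pvGrabRun_spec (S : PySem.Set Int) : ∀ (chars : List Char) (j : Int),
    chars = (pvGrabRun S chars j).1 ++ (pvGrabRun S chars j).2.1 ∧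
    (pvGrabRun S chars j).2.2 = j + (pvGrabRun S chars j).1.length ∧
    (∀ m : Nat, m < (pvGrabRun S chars j).1.length → PySem.Set.contains S (j + m) = true) := by
  intro chars
  induction chars with
  | nil => intro j; simp [pvGrabRun]
  | cons d ds ih =>
    intro j
    by_cases h : PySem.Set.contains S j = true
    · obtain ⟨h1, h2, h3⟩ := ih (j+1)
      simp only [pvGrabRun, h, if_true]
      refine ⟨by simpa using congrArg (d :: ·) h1, by simp [h2]; omega, ?_⟩
      intro m hm
      match m with
      | 0 => simpa using h
      | Nat.succ k =>
        have he : j + (Nat.succ k : Nat) = (j+1) + (k : Nat) := by push_cast; omega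
        rw [he]
        exact h3 k (by simpa using hm)
    · simp only [pvGrabRun, h]
      simp

-- A's loop over a block of unsecured indices, starting with the flag set:
-- it pops the trailing '}' once and appends the whole run followed by '}'
theorem pvFixA_run (S : PySem.Set Int) : ∀ (run : List Char) (rest : List Char) (j : Int) (p acc : List Char),
    acc = p ++ ['}'] →
    (∀ m : Nat, m < run.length → PySem.Set.contains S (j + m) = true) →
    pvFixAGo S (run ++ rest) j acc true =
      pvFixAGo S rest (j + run.length) ((p ++ run) ++ ['}']) true := by
  intro run
  induction run with
  | nil => intro rest j p acc hacc _; simp [hacc]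
  | cons c cs ih =>
    intro rest j p acc hacc hmem
    have hj : PySem.Set.contains S j = true := by simpa using hmem 0 (by simp)
    simp only [List.cons_append, pvFixAGo, hj, if_true]
    have hdrop : acc.dropLast = p := by simp [hacc]
    rw [hdrop]
    rw [ih rest (j+1) (p ++ [c]) ((p ++ [c]) ++ ['}']) rfl
      (by
        intro m hm
        have he : (j+1) + (m : Nat) = j + ((m+1 : Nat) : Int) := by push_cast; omega
        rw [he]
        exact hmem (m+1) (by simpa using Nat.succ_lt_succ hm))]
    congr 1
    · simp [List.length_cons]; omega
    · simp

-- main invariant: A's flag tracks "acc ends with '}'", and then A's loop equals B's loop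
theorem pvFixAB (S : PySem.Set Int) : ∀ (n : Nat) (chars : List Char), chars.length ≤ n →
    ∀ (i : Int) (acc : List Char) (flag : Bool),
    (flag = true ↔ acc.getLast? = some '}') →
    pvFixAGo S chars i acc flag = pvFixBGo S chars i acc := by
  intro n
  induction n with
  | zero =>
    intro chars hlen i acc flag _
    have h0 : chars = [] := List.length_eq_zero_iff.mp (Nat.le_zero.mp hlen)
    subst h0
    simp [pvFixAGo, pvFixBGo]
  | succ m ih =>
    intro chars hlen i acc flag hinv
    match chars with
    | [] => simp [pvFixAGo, pvFixBGo]
    | c :: rest =>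
      have hrl : rest.length ≤ m := by simpa using hlen
      by_cases hc : PySem.Set.contains S i = true
      · -- unsecured index: A walks the run one char at a time, B consumes it at once
        obtain ⟨hsplit, hidx, hmem⟩ := pvGrabRun_spec S rest (i+1)
        set r := pvGrabRun S rest (i+1) with hr
        have hpre : (if flag = true then acc.dropLast else acc ++ ['{'])
            = (if acc.getLast? = some '}' then acc.dropLast else acc ++ ['{']) := by
          by_cases hf : flag = true
          · rw [if_pos hf, if_pos (hinv.mp hf)]
          · rw [if_neg hf, if_neg (fun h => hf (hinv.mpr h))]
        set pre := if acc.getLast? = some '}' then acc.dropLast else acc ++ ['{'] with hpredef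
        simp only [pvFixAGo, pvFixBGo, hc, if_true]
        rw [hpre]
        conv_lhs => rw [hsplit]
        rw [pvFixA_run S r.1 r.2.1 (i+1) (pre ++ [c]) ((pre ++ [c]) ++ ['}']) rfl hmem]
        have hlen' : r.2.1.length ≤ m := by
          have h2 := hrl; rw [hsplit] at h2; simp at h2; omega
        rw [ih r.2.1 hlen' (i + 1 + r.1.length) (((pre ++ [c]) ++ r.1) ++ ['}']) true
          (by refine ⟨fun _ => ?_, fun _ => rfl⟩; exact pvLastBrace _)]
        rw [← hidx]
        congr 1
        simp only [List.append_assoc, List.cons_append]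
        rw [← hpredef, ← hr]
        simp
      · -- ordinary character
        simp only [pvFixAGo, pvFixBGo, hc, Bool.false_eq_true, if_false]
        exact ih rest hrl (i+1) (acc ++ [c]) (c == '}') (by simp)

-- ===== VERDICT (by name: the statement is the Claim_ definition above) =====
theorem fixUnsecuredUppercase_spec : Claim_equal_fixUnsecuredUppercase := by
  intro text unsecuredChars _
  unfold Spec_fixUnsecuredUppercase fixUnsecuredUppercase fixUnsecuredUppercase_alt
  rw [pvFixAB _ text.toList.length text.toList le_rfl 0 [] false (by simp)]
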